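-- pv_equiv track=rewrite | github.com/JCarbon3/CS115 | life_starter/life.py | innerCells
-- ===== SOURCE A (Python) =====
-- def createOneRow(width):
--     """Returns one row of zeros of width "width"...
--        You should use this in your
--        createBoard(width, height) function."""
--     row = []
--     for col in range(width):
--         row += [0]
--     return row
--
-- def createBoard(width, height):
--     """Returns a 2D array with "height" rows and "width" cols """
--     A = []
--     for row in range(height):
--         A += [createOneRow(width)]
--     return A
--
-- def innerCells(w, h):
--     """ creates an empty board and then modies it
--         so that all cells are "on" except a one-
--         cell-wide border of empty cells """
--     A = createBoard(w, h)
--     for row in range(h):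
--         for col in range(w):
--             if row == 0 or row == (h-1) or col == 0 or col == (w-1):
--                 A[row][col] = 0
--             else:
--                 A[row][col] = 1
--     return A
-- ===== SOURCE B (Python) =====
-- def _row(w, border):
--     if border or w <= 1:
--         return [0] * w   # border row, or a row too narrow to have interior cells
--     return [0] + [1] * (w - 2) + [0]
--
-- def innerCells(w, h):
--     return [_row(w, r == 0 or r == h - 1) for r in range(h)]
-- ===== Notes on version B (the rewrite author's own statement) =====
-- stated objective: faster
-- what changed: B classifies each row once (border vs interior) and builds it directly with list multiplication/concatenation, instead of A building an all-zero board and then revisiting every cell with a four-way border test.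
import Mathlib
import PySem

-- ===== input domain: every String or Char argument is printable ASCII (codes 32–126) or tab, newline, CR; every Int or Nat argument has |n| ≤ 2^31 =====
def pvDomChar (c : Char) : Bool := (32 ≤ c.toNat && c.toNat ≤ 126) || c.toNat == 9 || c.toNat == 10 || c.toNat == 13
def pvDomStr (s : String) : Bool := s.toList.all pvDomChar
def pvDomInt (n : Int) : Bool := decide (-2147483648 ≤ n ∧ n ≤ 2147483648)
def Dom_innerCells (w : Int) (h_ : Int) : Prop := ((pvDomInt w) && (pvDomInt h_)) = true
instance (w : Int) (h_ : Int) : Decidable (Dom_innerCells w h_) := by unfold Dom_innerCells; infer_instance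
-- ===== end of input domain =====

-- B builds each row directly (all-zero border rows; interior rows as 0,1...1,0) instead of
-- zero-filling a board and then rewriting every cell with a four-way border test.


-- ===== PORT A =====
def createOneRow (width : Int) : List Int :=
  (PySem.List.pyRange 0 width 1).foldl (fun row _ => row ++ [0]) []

def createBoard (width height : Int) : List (List Int) :=
  (PySem.List.pyRange 0 height 1).foldl (fun A _ => A ++ [createOneRow width]) []

-- A[row][col] = v, with row/col always in range (they come from range(h)/range(w))
def innerCells (w : Int) (h_ : Int) : List (List Int) :=
  (PySem.List.pyRange 0 h_ 1).foldl (fun A row =>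
    (PySem.List.pyRange 0 w 1).foldl (fun A col =>
      A.set row.toNat ((A.getD row.toNat []).set col.toNat
        (if row = 0 ∨ row = h_ - 1 ∨ col = 0 ∨ col = w - 1 then 0 else 1))) A)
    (createBoard w h_)

-- ===== PORT B =====
def rowB (w : Int) (border : Bool) : List Int :=
  if border || decide (w ≤ 1) then List.replicate w.toNat 0
  else 0 :: (List.replicate (w - 2).toNat 1 ++ [0])

def innerCells_alt (w : Int) (h_ : Int) : List (List Int) :=
  (PySem.List.pyRange 0 h_ 1).map (fun r => rowB w (decide (r = 0) || decide (r = h_ - 1)))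

-- ===== PRECONDITION & SPEC =====
def Spec_innerCells (w : Int) (h_ : Int) (out : List (List Int)) : Prop := out = innerCells_alt w h_
instance (w : Int) (h_ : Int) (out : List (List Int)) : Decidable (Spec_innerCells w h_ out) := by unfold Spec_innerCells; infer_instance

-- ===== CLAIM (what is proved, stated in full; the proofs are below) =====
def Claim_equal_innerCells : Prop := ∀ (w : Int) (h_ : Int), Dom_innerCells w h_ → Spec_innerCells w h_ (innerCells w h_)

-- ===== LEMMAS AND PROOFS =====

theorem foldl_set_length (v : Int → Int) (l : List Int) (row : List Int) :
    (l.foldl (fun r c => r.set c.toNat (v c)) row).length = row.length := by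
  induction l generalizing row with
  | nil => rfl
  | cons c rest ih => simp [List.foldl_cons, ih]

theorem foldl_set_getElem? (v : Int → Int) (b : Int) :
    ∀ (n : Nat) (a : Int), 0 ≤ a → (b - a).toNat = n →
    ∀ (row : List Int) (i : Nat), i < row.length →
    ((PySem.List.pyRange a b 1).foldl (fun r c => r.set c.toNat (v c)) row)[i]?
      = if a ≤ (i : Int) ∧ (i : Int) < b then some (v i) else row[i]? := by
  intro n
  induction n with
  | zero =>
    intro a ha hn row i hi
    rw [PySem.List.pyRange_one_eq_nil (by omega)]
    simp only [List.foldl_nil]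
    rw [if_neg (by omega)]
  | succ m ih =>
    intro a ha hn row i hi
    rw [PySem.List.pyRange_one_cons (show a < b by omega)]
    simp only [List.foldl_cons]
    rw [ih (a + 1) (by omega) (by omega) _ i (by simpa using hi)]
    rw [List.getElem?_set]
    split_ifs <;> first | rfl | omega | (congr 2; omega)

theorem inner_step (u : Int → Int) (l : List Int) :
    ∀ (A : List (List Int)) (n : Nat), n < A.length →
    l.foldl (fun A c => A.set n ((A.getD n []).set c.toNat (u c))) A
      = A.set n (l.foldl (fun row c => row.set c.toNat (u c)) (A.getD n [])) := by
  induction l with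
  | nil =>
    intro A n h
    simp only [List.foldl_nil]
    rw [List.getD_eq_getElem _ _ h, List.set_getElem_self h]
  | cons c rest ih =>
    intro A n h
    simp only [List.foldl_cons]
    rw [ih _ n (by simpa using h)]
    rw [List.set_set]
    congr 2
    rw [List.getD_eq_getElem?_getD, List.getElem?_set_self (by simpa using h)]
    rfl

theorem inner_length (u : Int → Int) (n : Nat) (l : List Int) :
    ∀ (A : List (List Int)),
    (l.foldl (fun A c => A.set n ((A.getD n []).set c.toNat (u c))) A).length = A.length := by
  induction l with
  | nil => intro A; rfl
  | cons c rest ih => intro A; simp only [List.foldl_cons]; rw [ih]; simp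

theorem outer_length (u : Int → Int → Int) (w : Int) (l : List Int) :
    ∀ (A : List (List Int)),
    (l.foldl (fun A r =>
        (PySem.List.pyRange 0 w 1).foldl
          (fun A c => A.set r.toNat ((A.getD r.toNat []).set c.toNat (u r c))) A) A).length
      = A.length := by
  induction l with
  | nil => intro A; rfl
  | cons r rest ih => intro A; simp only [List.foldl_cons]; rw [ih, inner_length]

theorem outer_getElem? (u : Int → Int → Int) (w b : Int) :
    ∀ (n : Nat) (a : Int), 0 ≤ a → (b - a).toNat = n →
    ∀ (A : List (List Int)), b ≤ (A.length : Int) →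
    ∀ (i : Nat), i < A.length →
    ((PySem.List.pyRange a b 1).foldl (fun A r =>
        (PySem.List.pyRange 0 w 1).foldl
          (fun A c => A.set r.toNat ((A.getD r.toNat []).set c.toNat (u r c))) A) A)[i]?
      = if a ≤ (i : Int) ∧ (i : Int) < b then
          some ((PySem.List.pyRange 0 w 1).foldl
            (fun row c => row.set c.toNat (u i c)) (A.getD i []))
        else A[i]? := by
  intro n
  induction n with
  | zero =>
    intro a ha hn A hb i hi
    rw [PySem.List.pyRange_one_eq_nil (show b ≤ a by omega)]
    simp only [List.foldl_nil]
    rw [if_neg (by omega)]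
  | succ m ih =>
    intro a ha hn A hb i hi
    rw [PySem.List.pyRange_one_cons (show a < b by omega)]
    simp only [List.foldl_cons]
    rw [inner_step (u a) _ A a.toNat (by omega)]
    rw [ih (a + 1) (by omega) (by omega) _ (by simpa using hb) i (by simpa using hi)]
    by_cases hia : a.toNat = i
    · rw [if_neg (show ¬(a + 1 ≤ (i : Int) ∧ (i : Int) < b) by omega),
          if_pos (show a ≤ (i : Int) ∧ (i : Int) < b by omega)]
      rw [hia, List.getElem?_set_self hi]
      rw [show a = (i : Int) by omega]
    · rw [List.getElem?_set_ne hia]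
      rw [show ((A.set a.toNat ((PySem.List.pyRange 0 w 1).foldl
            (fun row c => row.set c.toNat (u a c)) (A.getD a.toNat []))).getD i []) = A.getD i [] by
          rw [List.getD_eq_getElem?_getD, List.getElem?_set_ne hia, ← List.getD_eq_getElem?_getD]]
      split_ifs <;> first | rfl | omega
theorem createOneRow_eq (w : Int) : createOneRow w = List.replicate w.toNat 0 := by
  unfold createOneRow
  rw [show (fun (row : List Int) (_ : Int) => row ++ [0]) = (fun row c => row ++ [(fun (_ : Int) => (0:Int)) c]) from rfl]
  rw [PySem.List.foldl_append_singleton_eq_map]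
  simp [List.map_const', PySem.List.length_pyRange_one]

theorem createBoard_eq (w h_ : Int) :
    createBoard w h_ = List.replicate h_.toNat (List.replicate w.toNat 0) := by
  unfold createBoard
  rw [show (fun (A : List (List Int)) (_ : Int) => A ++ [createOneRow w])
        = (fun A r => A ++ [(fun (_ : Int) => createOneRow w) r]) from rfl]
  rw [PySem.List.foldl_append_singleton_eq_map]
  simp [List.map_const', PySem.List.length_pyRange_one, createOneRow_eq]

theorem rowB_length (w : Int) (b : Bool) : (rowB w b).length = w.toNat := by
  unfold rowB
  split_ifs with h
  · simp
  · simp only [Bool.or_eq_true, decide_eq_true_eq, not_or] at h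
    simp
    omega

theorem rowB_getElem? (w : Int) (b : Bool) (j : Nat) (hj : j < w.toNat) :
    (rowB w b)[j]? = some (if b = true ∨ j = 0 ∨ (j : Int) = w - 1 then 0 else 1) := by
  unfold rowB
  by_cases h : (b || decide (w ≤ 1)) = true
  · rw [if_pos h, List.getElem?_replicate, if_pos hj]
    simp only [Bool.or_eq_true, decide_eq_true_eq] at h
    rw [if_pos ?_]
    rcases h with h | h
    · exact Or.inl h
    · exact Or.inr (Or.inl (by omega))
  · simp only [Bool.or_eq_true, decide_eq_true_eq, not_or, Bool.not_eq_true] at h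
    obtain ⟨hb, hw⟩ := h
    have hw2 : 2 ≤ w := by omega
    subst hb
    rw [if_neg (by simp; omega)]
    simp only [Bool.false_eq_true, false_or]
    rcases j with _ | k
    · simp
    · rw [List.getElem?_cons_succ]
      by_cases hk : k < (w - 2).toNat
      · rw [List.getElem?_append_left (by simpa using hk), List.getElem?_replicate, if_pos hk]
        rw [if_neg (by simp; omega)]
      · have hk' : k = (w - 2).toNat := by omega
        rw [List.getElem?_append_right (by simp [hk'])]
        simp only [List.length_replicate, hk']
        rw [if_pos (Or.inr (by omega))]
        simp

theorem row_main (w h_ : Int) (i : Nat) :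
    (PySem.List.pyRange 0 w 1).foldl
        (fun row c => row.set c.toNat
          (if (i : Int) = 0 ∨ (i : Int) = h_ - 1 ∨ c = 0 ∨ c = w - 1 then (0 : Int) else 1))
        (List.replicate w.toNat 0)
      = rowB w (decide ((i : Int) = 0) || decide ((i : Int) = h_ - 1)) := by
  apply List.ext_getElem?
  intro j
  by_cases hj : j < w.toNat
  · rw [foldl_set_getElem?
        (fun c => if (i : Int) = 0 ∨ (i : Int) = h_ - 1 ∨ c = 0 ∨ c = w - 1 then (0 : Int) else 1)
        w w.toNat 0 le_rfl (by omega) _ j (by simpa using hj)]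
    rw [rowB_getElem? w _ j hj]
    rw [if_pos (by omega)]
    congr 1
    simp only [Bool.or_eq_true, decide_eq_true_eq]
    split_ifs <;> omega
  · rw [List.getElem?_eq_none (by rw [foldl_set_length]; simpa using Nat.le_of_not_lt hj)]
    rw [List.getElem?_eq_none (by rw [rowB_length]; exact Nat.le_of_not_lt hj)]

theorem main_eq (w h_ : Int) : innerCells w h_ = innerCells_alt w h_ := by
  unfold innerCells innerCells_alt
  rw [createBoard_eq]
  apply List.ext_getElem?
  intro i
  by_cases hi : i < h_.toNat
  · rw [outer_getElem?
        (fun r c => if r = 0 ∨ r = h_ - 1 ∨ c = 0 ∨ c = w - 1 then (0 : Int) else 1)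
        w h_ h_.toNat 0 le_rfl (by omega) _ (by simp) i (by simpa using hi)]
    rw [if_pos (by omega)]
    rw [List.getElem?_map, PySem.List.getElem?_pyRange_one, if_pos (by simpa using hi)]
    rw [List.getD_replicate _ hi]
    simp only [zero_add, Option.map_some]
    rw [row_main]
  · rw [List.getElem?_eq_none (by rw [outer_length]; simpa using Nat.le_of_not_lt hi)]
    rw [List.getElem?_eq_none (by simp [PySem.List.length_pyRange_one]; omega)]

-- ===== VERDICT (by name: the statement is the Claim_ definition above) =====
theorem innerCells_spec : Claim_equal_innerCells := by
  intro w h_ _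
  exact main_eq w h_
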